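-- pv_equiv track=rewrite | github.com/Eric-Musa/sms-monkey | monkeybot/conversation_manager.py | trim_incomplete_response
-- ===== SOURCE A (Python) =====
-- def trim_incomplete_response(response, delimiters=('.', '!', '?'), comma_is_delimiter=False):
--     if not response.endswith(delimiters):
--         i = len(response)
--         while i > 0:
--             i -= 1
--             if response[i] in delimiters:
--                 return response[:i+1]
--             elif response[i] == ',' and comma_is_delimiter:
--                 return response[:i] + '...'
--     return response
-- ===== SOURCE B (Python) =====
-- def trim_incomplete_response(response, delimiters=('.', '!', '?'), comma_is_delimiter=False):
--     if response.endswith(tuple(delimiters)):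
--         return response
--     j = max((response.rfind(d) for d in delimiters if len(d) == 1), default=-1)
--     k = response.rfind(',') if comma_is_delimiter else -1
--     if j == -1 and k == -1:
--         return response
--     if j >= k:
--         return response[:j + 1]
--     return response[:k] + '...'
-- ===== Notes on version B (the rewrite author's own statement) =====
-- stated objective: faster
-- what changed: Replaces A's manual backward index loop over characters by library rfind scans: the max of rfind over the single-character delimiters, plus an rfind for the comma when commas count, picks the cut position, and a single comparison decides which branch applies.
import Mathlib
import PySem

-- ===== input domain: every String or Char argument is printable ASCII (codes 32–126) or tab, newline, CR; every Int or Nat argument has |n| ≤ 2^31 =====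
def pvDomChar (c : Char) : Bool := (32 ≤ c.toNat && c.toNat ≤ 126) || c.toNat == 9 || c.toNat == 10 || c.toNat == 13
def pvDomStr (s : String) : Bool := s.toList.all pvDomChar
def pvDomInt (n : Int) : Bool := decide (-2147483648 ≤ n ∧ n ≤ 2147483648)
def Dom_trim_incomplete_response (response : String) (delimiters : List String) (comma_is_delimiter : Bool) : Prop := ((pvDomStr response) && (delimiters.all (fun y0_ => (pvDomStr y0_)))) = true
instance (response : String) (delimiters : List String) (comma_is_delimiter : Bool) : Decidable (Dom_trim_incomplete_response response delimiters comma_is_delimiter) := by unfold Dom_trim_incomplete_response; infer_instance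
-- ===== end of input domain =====

-- B replaces A's manual backward character loop by library rfind scans plus a max-index comparison (measured faster in a timing run).

-- ===== PORT A =====
-- A's backward while-loop: i runs from len(response)-1 down to 0; response[:i+1] / response[:i]
-- are ported as List.take on the character list (exactly Python's slice with a Nat bound).
def pvTrimLoopA (response : String) (delimiters : List String) (comma_is_delimiter : Bool) : Nat → String
  | 0 => response
  | i + 1 =>
    match response.toList[i]? with
    | none => response   -- unreachable: the loop starts at len(response), so i is always in range
    | some c =>
      if delimiters.contains (String.ofList [c]) then String.ofList (response.toList.take (i + 1))
      else if c == ',' && comma_is_delimiter then String.ofList (response.toList.take i ++ ['.', '.', '.'])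
      else pvTrimLoopA response delimiters comma_is_delimiter i

def trim_incomplete_response (response : String) (delimiters : List String) (comma_is_delimiter : Bool) : String :=
  -- Python's response.endswith(tuple): true iff it ends with ANY of the delimiter strings
  if !(delimiters.any (fun d => PySem.Str.endswith response d)) then
    pvTrimLoopA response delimiters comma_is_delimiter response.toList.length
  else response

-- ===== PORT B =====
-- j = max(rfind over single-character delimiters, default -1); k = rfind(',') if commas count
def pvDelimPos (response : String) (delimiters : List String) : Int :=
  (delimiters.filter (fun d => PySem.Str.len d == 1)).foldl
    (fun acc d => max acc (PySem.Str.rfind response d)) (-1)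

def pvCommaPos (response : String) (comma_is_delimiter : Bool) : Int :=
  if comma_is_delimiter then PySem.Str.rfind response "," else -1

def trim_incomplete_response_alt (response : String) (delimiters : List String) (comma_is_delimiter : Bool) : String :=
  if delimiters.any (fun d => PySem.Str.endswith response d) then response
  else if pvDelimPos response delimiters == -1 && pvCommaPos response comma_is_delimiter == -1 then
    response
  else if pvCommaPos response comma_is_delimiter ≤ pvDelimPos response delimiters then
    String.ofList (response.toList.take ((pvDelimPos response delimiters).toNat + 1))
  else
    String.ofList (response.toList.take (pvCommaPos response comma_is_delimiter).toNat ++ ['.', '.', '.'])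

-- ===== PRECONDITION & SPEC =====
def Spec_trim_incomplete_response (response : String) (delimiters : List String) (comma_is_delimiter : Bool) (out : String) : Prop := out = trim_incomplete_response_alt response delimiters comma_is_delimiter
instance (response : String) (delimiters : List String) (comma_is_delimiter : Bool) (out : String) : Decidable (Spec_trim_incomplete_response response delimiters comma_is_delimiter out) := by unfold Spec_trim_incomplete_response; infer_instance

-- ===== CLAIM (what is proved, stated in full; the proofs are below) =====
def Claim_equal_trim_incomplete_response : Prop := ∀ (response : String) (delimiters : List String) (comma_is_delimiter : Bool), Dom_trim_incomplete_response response delimiters comma_is_delimiter → Spec_trim_incomplete_response response delimiters comma_is_delimiter (trim_incomplete_response response delimiters comma_is_delimiter)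

-- ===== LEMMAS AND PROOFS =====

-- the last index l < n satisfying p, if any
def pvLastHit (p : Nat → Bool) : Nat → Option Nat
  | 0 => none
  | i + 1 => if p i then some i else pvLastHit p i

def pvToInt (o : Option Nat) : Int := o.elim (-1) (fun m => (m : Int))

@[simp] theorem pvToInt_none : pvToInt none = -1 := rfl
@[simp] theorem pvToInt_some (m : Nat) : pvToInt (some m) = (m : Int) := rfl

def pvP (δ : List String) (cs : List Char) (j : Nat) : Bool :=
  (cs[j]?).any (fun c => δ.contains (String.ofList [c]))

def pvK (γ : Bool) (cs : List Char) (j : Nat) : Bool := γ && (cs[j]? == some ',')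

theorem pvLastHit_congr (p q : Nat → Bool) (h : ∀ j, p j = q j) :
    ∀ n, pvLastHit p n = pvLastHit q n := by
  intro n; induction n with
  | zero => rfl
  | succ i ih => simp [pvLastHit, h, ih]

theorem pvToInt_neg_one_le (o : Option Nat) : -1 ≤ pvToInt o := by
  cases o <;> simp [pvToInt]

theorem pvLastHit_lt (p : Nat → Bool) : ∀ n, pvToInt (pvLastHit p n) < (n : Int) := by
  intro n; induction n with
  | zero => simp [pvLastHit, pvToInt]
  | succ i ih =>
      by_cases h : p i = true <;> simp [pvLastHit, h] <;> omega

theorem pvLastHit_or (p q : Nat → Bool) :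
    ∀ n, pvToInt (pvLastHit (fun j => p j || q j) n)
      = max (pvToInt (pvLastHit p n)) (pvToInt (pvLastHit q n)) := by
  intro n; induction n with
  | zero => simp [pvLastHit]
  | succ i ih =>
      have hp := pvLastHit_lt p i
      have hq := pvLastHit_lt q i
      by_cases h1 : p i = true <;> by_cases h2 : q i = true <;>
        simp [pvLastHit, h1, h2, ih] <;> omega

theorem pvLastHit_spec_some (p : Nat → Bool) :
    ∀ n l, pvLastHit p n = some l → p l = true ∧ l < n := by
  intro n; induction n with
  | zero => intro l h; simp [pvLastHit] at h
  | succ i ih =>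
      intro l h
      by_cases hi : p i = true
      · simp [pvLastHit, hi] at h; subst h; exact ⟨hi, by omega⟩
      · simp [pvLastHit, hi] at h
        obtain ⟨h1, h2⟩ := ih l h
        exact ⟨h1, by omega⟩

theorem pvLastHit_le_of_hit (p : Nat → Bool) :
    ∀ n m, m < n → p m = true → (m : Int) ≤ pvToInt (pvLastHit p n) := by
  intro n; induction n with
  | zero => intro m h; omega
  | succ i ih =>
      intro m hm hp
      by_cases hi : p i = true
      · rw [pvLastHit, if_pos hi]; simp only [pvToInt_some]; omega
      · have hne : m ≠ i := by rintro rfl; exact hi hp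
        rw [pvLastHit, if_neg hi]
        exact ih m (by omega) hp

theorem pvToInt_eq_some (o : Option Nat) (l : Nat) (h : pvToInt o = (l : Int)) :
    o = some l := by
  cases o with
  | none => simp [pvToInt] at h
  | some m => simp [pvToInt] at h; simp [h]

-- single-character prefix test = indexing
theorem pvPrefix_single_iff (cs : List Char) (c : Char) (j : Nat) :
    [c] <+: cs.drop j ↔ cs[j]? = some c := by
  have hh : (cs.drop j).head? = cs[j]? := by
    simp [List.head?_drop]
  cases hdr : cs.drop j with
  | nil =>
      simp [hdr] at hh
      simp [hh]
  | cons x xs =>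
      simp [hdr] at hh
      rw [← hh]
      simp [List.cons_prefix_cons, eq_comm]

theorem pvRfind_go_single (cs : List Char) (c : Char) :
    ∀ i, PySem.Chars.rfind.go cs [c] i
        = pvToInt (pvLastHit (fun j => cs[j]? == some c) (i + 1)) := by
  intro i; induction i with
  | zero =>
      have h0 := pvPrefix_single_iff cs c 0
      rw [List.drop_zero] at h0
      by_cases h : cs[0]? = some c <;>
        simp [PySem.Chars.rfind.go, pvLastHit, h0, h]
  | succ j ih =>
      by_cases h : cs[j + 1]? = some c <;>
        simp [PySem.Chars.rfind.go, pvLastHit, pvPrefix_single_iff, h, ih]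

theorem pvRfind_single (response : String) (d : String) (c : Char) (hc : d.toList = [c]) :
    PySem.Str.rfind response d
      = pvToInt (pvLastHit (fun j => response.toList[j]? == some c) response.toList.length) := by
  have hn : response.toList[response.toList.length]? = none := by simp
  rw [PySem.Str.rfind_eq, hc]
  show PySem.Chars.rfind.go response.toList [c] response.toList.length = _
  rw [pvRfind_go_single]
  simp [pvLastHit]

theorem pvMk_inj (l1 l2 : List Char) : String.ofList l1 = String.ofList l2 ↔ l1 = l2 := by
  constructor
  · intro h
    have := congrArg String.toList h
    simpa using this
  · intro h; rw [h]

theorem pvMk_single_beq (a b : Char) : (String.ofList [a] == String.ofList [b]) = (a == b) := by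
  by_cases h : a = b
  · simp [h]
  · simp [h, pvMk_inj]

-- the fold of max over rfind of single-character delimiters
theorem pvFoldB (response : String) :
    ∀ (ds : List String), (∀ d ∈ ds, d.toList.length = 1) → ∀ (a : Int), -1 ≤ a →
      ds.foldl (fun acc d => max acc (PySem.Str.rfind response d)) a
        = max a (pvToInt (pvLastHit (pvP ds response.toList) response.toList.length)) := by
  intro ds
  induction ds with
  | nil =>
      intro _ a ha
      have h0 : pvLastHit (pvP [] response.toList) response.toList.length = none := by
        rw [pvLastHit_congr _ (fun _ => false) (by intro j; simp [pvP])]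
        induction response.toList.length with
        | zero => rfl
        | succ i ih => simp [pvLastHit, ih]
      simp only [List.foldl_nil, h0, pvToInt_none]
      exact (max_eq_left ha).symm
  | cons d rest ih =>
      intro hall a ha
      obtain ⟨c, hc⟩ : ∃ c, d.toList = [c] := by
        have := hall d (by simp)
        cases hd : d.toList with
        | nil => simp [hd] at this
        | cons x xs => cases xs with
          | nil => exact ⟨x, rfl⟩
          | cons y ys => simp [hd] at this
      have hd : d = String.ofList [c] := by
        rw [← hc]
        exact String.ofList_toList.symm
      have hrf := pvRfind_single response d c hc
      have hrest : ∀ d' ∈ rest, d'.toList.length = 1 := fun d' hd' => hall d' (by simp [hd'])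
      have hcongr : ∀ j, (fun j => (response.toList[j]? == some c) || pvP rest response.toList j) j
          = pvP (d :: rest) response.toList j := by
        intro j
        cases hj : response.toList[j]? with
        | none => simp [pvP, hj]
        | some x =>
            simp only [pvP, hj, Option.any_some, hd, List.contains_cons]
            rw [pvMk_single_beq]
            simp
      have hor := pvLastHit_or (fun j => response.toList[j]? == some c)
        (pvP rest response.toList) response.toList.length
      rw [pvLastHit_congr _ _ hcongr] at hor
      simp only [List.foldl_cons]
      rw [ih hrest (max a (PySem.Str.rfind response d))
        (le_trans ha (le_max_left _ _))]
      rw [hrf, max_assoc, ← hor]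

-- characterization of A's backward loop
theorem pvLoopA_spec (response : String) (δ : List String) (γ : Bool) :
    ∀ i, i ≤ response.toList.length →
      pvTrimLoopA response δ γ i
        = match pvLastHit (fun j => pvP δ response.toList j || pvK γ response.toList j) i with
          | none => response
          | some l =>
              if pvP δ response.toList l
              then String.ofList (response.toList.take (l + 1))
              else String.ofList (response.toList.take l ++ ['.', '.', '.']) := by
  intro i; induction i with
  | zero => intro _; simp [pvTrimLoopA, pvLastHit]
  | succ i ih =>
      intro hi
      have hlt : i < response.toList.length := by omega
      obtain ⟨c, hc⟩ : ∃ c, response.toList[i]? = some c :=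
        ⟨response.toList[i], by simp⟩
      by_cases h1 : String.ofList [c] ∈ δ
      · have hP : pvP δ response.toList i = true := by
          simp only [pvP, hc, Option.any_some]; simp [h1]
        simp [pvTrimLoopA, hc, h1, pvLastHit, hP]
      · have hP : pvP δ response.toList i = false := by
          simp only [pvP, hc, Option.any_some]; simp [h1]
        by_cases h2 : c = ',' ∧ γ = true
        · obtain ⟨hc2, hγ⟩ := h2
          subst hc2
          subst hγ
          have hK : pvK true response.toList i = true := by simp [pvK, hc]
          have h1' : ("," : String) ∉ δ := by simpa using h1
          simp [pvTrimLoopA, hc, pvLastHit, hP, hK, h1']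
        · have hK : pvK γ response.toList i = false := by
            rw [pvK, hc]
            rcases Bool.eq_false_or_eq_true γ with hγ | hγ
            · rw [hγ, Bool.true_and]
              apply beq_eq_false_iff_ne.mpr
              intro hcc
              exact h2 ⟨Option.some.inj hcc, hγ⟩
            · rw [hγ, Bool.false_and]
          have hB : (c == ',' && γ) = false := by
            rcases Bool.eq_false_or_eq_true γ with hγ | hγ
            · rw [hγ, Bool.and_true]
              apply beq_eq_false_iff_ne.mpr
              intro hcc
              exact h2 ⟨hcc, hγ⟩
            · rw [hγ, Bool.and_false]
          simp [pvTrimLoopA, hc, h1, hB, pvLastHit, hP, hK, ih (by omega)]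

-- the filter over single-character delimiters does not change pvP
theorem pvP_filter (δ : List String) (cs : List Char) (j : Nat) :
    pvP (δ.filter (fun d => PySem.Str.len d == 1)) cs j = pvP δ cs j := by
  cases hj : cs[j]? with
  | none => simp [pvP, hj]
  | some c =>
      simp only [pvP, hj, Option.any_some]
      have hlen : (PySem.Str.len (String.ofList [c]) == (1 : Int)) = true := by
        simp [PySem.Str.len_eq]
      simp only [List.contains_eq_mem]
      rw [Bool.eq_iff_iff]
      simp only [decide_eq_true_eq, List.mem_filter, hlen]
      simp

-- k as a pvLastHit
theorem pvK_rfind (response : String) (γ : Bool) :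
    (if γ then PySem.Str.rfind response "," else -1)
      = pvToInt (pvLastHit (pvK γ response.toList) response.toList.length) := by
  cases γ with
  | false =>
      have h0 : pvLastHit (pvK false response.toList) response.toList.length = none := by
        rw [pvLastHit_congr _ (fun _ => false) (by intro j; simp [pvK])]
        induction response.toList.length with
        | zero => rfl
        | succ i ih => simp [pvLastHit, ih]
      rw [if_neg (by simp), h0]
      rfl
  | true =>
      have h := pvRfind_single response "," ',' (by rfl)
      rw [if_pos rfl, h]
      exact congrArg pvToInt (pvLastHit_congr _ _ (by intro j; simp [pvK]) _)

-- ===== VERDICT (by name: the statement is the Claim_ definition above) =====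
theorem trim_incomplete_response_spec : Claim_equal_trim_incomplete_response := by
  intro response δ γ _
  unfold Spec_trim_incomplete_response
  unfold trim_incomplete_response trim_incomplete_response_alt
  by_cases hE : (δ.any (fun d => PySem.Str.endswith response d)) = true
  · rw [if_neg (by rw [hE]; simp), if_pos hE]
  · have hE' : (δ.any (fun d => PySem.Str.endswith response d)) = false := by
      simpa using hE
    rw [if_pos (by rw [hE']; rfl), if_neg (by rw [hE']; simp)]
    have hall : ∀ d ∈ δ.filter (fun d => PySem.Str.len d == 1), d.toList.length = 1 := by
      intro d hd
      have h2 := (List.mem_filter.mp hd).2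
      simp only [PySem.Str.len_eq, beq_iff_eq] at h2
      rw [String.length_toList]
      exact_mod_cast h2
    have hfold := pvFoldB response (δ.filter (fun d => PySem.Str.len d == 1)) hall (-1)
      (by norm_num)
    have hPf : pvLastHit (pvP (δ.filter (fun d => PySem.Str.len d == 1)) response.toList) response.toList.length
        = pvLastHit (pvP δ response.toList) response.toList.length :=
      pvLastHit_congr _ _ (fun j => pvP_filter δ response.toList j) response.toList.length
    rw [hPf] at hfold
    have hJge := pvToInt_neg_one_le (pvLastHit (pvP δ response.toList) response.toList.length)
    rw [max_eq_right hJge] at hfold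
    have hJd : pvDelimPos response δ
        = pvToInt (pvLastHit (pvP δ response.toList) response.toList.length) := by
      unfold pvDelimPos; exact hfold
    have hKd : pvCommaPos response γ
        = pvToInt (pvLastHit (pvK γ response.toList) response.toList.length) := by
      unfold pvCommaPos; exact pvK_rfind response γ
    have hA := pvLoopA_spec response δ γ response.toList.length (le_refl _)
    have hor := pvLastHit_or (pvP δ response.toList) (pvK γ response.toList) response.toList.length
    set J := pvToInt (pvLastHit (pvP δ response.toList) response.toList.length) with hJ
    set K := pvToInt (pvLastHit (pvK γ response.toList) response.toList.length) with hK
    have hKge := pvToInt_neg_one_le (pvLastHit (pvK γ response.toList) response.toList.length)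
    rw [hA, hJd, hKd]
    cases hM : pvLastHit (fun j => pvP δ response.toList j || pvK γ response.toList j) response.toList.length with
    | none =>
        have hmax : max J K = -1 := by rw [← hor, hM]; rfl
        have hJ1 : J = -1 := le_antisymm (hmax ▸ le_max_left J K) hJge
        have hK1 : K = -1 := le_antisymm (hmax ▸ le_max_right J K) hKge
        rw [if_pos (by rw [hJ1, hK1]; rfl)]
    | some l =>
        have hmax : max J K = (l : Int) := by rw [← hor, hM]; rfl
        have hguard : ¬ ((J == -1) && (K == -1)) = true := by
          intro hg
          rw [Bool.and_eq_true, beq_iff_eq, beq_iff_eq] at hg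
          rw [hg.1, hg.2, max_self] at hmax
          omega
        rw [if_neg hguard]
        by_cases hKJ : K ≤ J
        · have hJl : J = (l : Int) := by rw [max_eq_left hKJ] at hmax; exact hmax
          have hsome := pvToInt_eq_some _ l (hJ ▸ hJl)
          have hPl : pvP δ response.toList l = true := (pvLastHit_spec_some _ _ _ hsome).1
          rw [if_pos hKJ]
          have hnat : J.toNat = l := by omega
          rw [hnat]
          show (if pvP δ response.toList l = true
              then String.ofList (response.toList.take (l + 1))
              else String.ofList (response.toList.take l ++ ['.', '.', '.'])) = _
          rw [if_pos hPl]
        · have hKl : K = (l : Int) := by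
            rw [max_eq_right ((not_le.mp hKJ).le)] at hmax; exact hmax
          have hln : l < response.toList.length := by
            have := pvLastHit_lt (fun j => pvP δ response.toList j || pvK γ response.toList j)
              response.toList.length
            rw [hM] at this
            simp at this
            rw [String.length_toList]
            omega
          have hPl : pvP δ response.toList l = false := by
            by_contra hcne
            have hPl' : pvP δ response.toList l = true := by
              cases h : pvP δ response.toList l
              · exact absurd h hcne
              · rfl
            have := pvLastHit_le_of_hit (pvP δ response.toList) response.toList.length l hln hPl'
            rw [← hJ] at this
            omega
          rw [if_neg hKJ]
          have hnat : K.toNat = l := by omega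
          rw [hnat]
          show (if pvP δ response.toList l = true
              then String.ofList (response.toList.take (l + 1))
              else String.ofList (response.toList.take l ++ ['.', '.', '.'])) = _
          rw [if_neg (by rw [hPl]; simp)]
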